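-- pv_equiv track=rewrite | github.com/JaMeSz04/2048_game | workk.py | getNear
-- ===== SOURCE A (Python) =====
-- def getNear(direction, baseX, baseY, board):
--     if direction == 'up':
--         for i in range(baseX, len(board)):
--             if i == baseX:
--                 continue
--             if board[i][baseY] != 0:
--                 return i
--         return None
--
--     elif direction == 'down':
--         for i in range(baseX, -1, -1):
--             if i == baseX:
--                 continue
--             if board[i][baseY] != 0:
--                 return i
--         return None
--
--     elif direction == 'left':
--         for j in range(baseY, len(board)):
--             if j == baseY:
--                 continue
--             if board[baseX][j] != 0:
--                 return j
--         return None
--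
--     elif direction == 'right':
--         for j in range(baseY, -1, -1):
--             if j == baseY:
--                 continue
--             if board[baseX][j] != 0:
--                 return j
--         return None
-- ===== SOURCE B (Python) =====
-- def getNear(direction, baseX, baseY, board):
--     n = len(board)
--     if direction in ('up', 'down'):
--         hits = [i for i in range(n) if board[i][baseY] != 0]
--         base = baseX
--     elif direction in ('left', 'right'):
--         hits = [j for j in range(n) if board[baseX][j] != 0]
--         base = baseY
--     else:
--         return None
--     if direction in ('up', 'left'):
--         after = [k for k in hits if k > base]
--         return min(after) if after else None
--     before = [k for k in hits if k < base]
--     return max(before) if before else None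
-- ===== Notes on version B (the rewrite author's own statement) =====
-- stated objective: alternative
-- what changed: A's four direction branches each do an early-return scan outward from the base; B instead collects in one comprehension ALL non-zero indices of the relevant row/column, then selects the nearest one with min (over indices above the base) or max (over indices below it).
-- outside the precondition, e.g. on getNear('up', -2, 0, [[0, 0], [5, 0]]): A returns -1, B returns 1; on getNear('up', 0, 1, [[1], [0, 2]]): A returns 1, B raises IndexError
import Mathlib
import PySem

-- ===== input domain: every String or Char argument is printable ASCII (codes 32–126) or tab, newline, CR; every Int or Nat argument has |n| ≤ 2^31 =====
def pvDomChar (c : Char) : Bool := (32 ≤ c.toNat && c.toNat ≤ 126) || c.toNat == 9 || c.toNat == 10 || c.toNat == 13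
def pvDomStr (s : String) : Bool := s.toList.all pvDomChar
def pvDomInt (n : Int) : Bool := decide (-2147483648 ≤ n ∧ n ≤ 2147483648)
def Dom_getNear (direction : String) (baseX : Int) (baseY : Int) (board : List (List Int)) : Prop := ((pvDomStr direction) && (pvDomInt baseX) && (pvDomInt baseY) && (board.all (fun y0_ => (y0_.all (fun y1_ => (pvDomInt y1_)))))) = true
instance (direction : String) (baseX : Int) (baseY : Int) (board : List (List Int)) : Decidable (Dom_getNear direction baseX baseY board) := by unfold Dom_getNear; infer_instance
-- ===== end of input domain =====

-- B replaces A's four early-return outward scans by collect-all-nonzero-indices-then-select-with-min/max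
-- (alternative decomposition; same cost). Return-value equivalence on Pre_ (base cell on the board,
-- rows at least board-height long).


-- ===== PORT A =====
-- board[i][j]; exact whenever 0 ≤ i < len(board) and 0 ≤ j < len(board[i]) (all accesses under Pre_ are)
def pyCell (board : List (List Int)) (i j : Int) : Int :=
  PySem.List.pyGetD ((PySem.List.pyGet? board i).getD []) j 0

-- A's loop body: "for c in cs: if c == skip: continue; if f c != 0: return c" then "return None"
def scanA (f : Int → Int) (skip : Int) : List Int → Option Int
  | [] => none
  | c :: rest =>
    if c = skip then scanA f skip rest
    else if f c ≠ 0 then some c else scanA f skip rest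

def getNear (direction : String) (baseX : Int) (baseY : Int) (board : List (List Int)) : Option Int :=
  if direction = "up" then
    scanA (fun i => pyCell board i baseY) baseX (PySem.List.pyRange baseX (board.length : Int) 1)
  else if direction = "down" then
    scanA (fun i => pyCell board i baseY) baseX (PySem.List.pyRange baseX (-1) (-1))
  else if direction = "left" then
    scanA (fun j => pyCell board baseX j) baseY (PySem.List.pyRange baseY (board.length : Int) 1)
  else if direction = "right" then
    scanA (fun j => pyCell board baseX j) baseY (PySem.List.pyRange baseY (-1) (-1))
  else none

-- ===== PORT B =====
-- Source B's tail: given base and the list of all non-zero indices of the line (ascending),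
-- pick min of those above base ('up'/'left') or max of those below it
def selectNear (direction : String) (base : Int) (hits : List Int) : Option Int :=
  if direction = "up" ∨ direction = "left" then
    let after := hits.filter (fun k => base < k)
    if after = [] then none else PySem.List.min? after (fun x => x)
  else
    let before := hits.filter (fun k => k < base)
    if before = [] then none else PySem.List.max? before (fun x => x)

def getNear_alt (direction : String) (baseX : Int) (baseY : Int) (board : List (List Int)) : Option Int :=
  let n := board.length
  if direction = "up" ∨ direction = "down" then
    selectNear direction baseX
      ((PySem.List.pyRange 0 (n : Int) 1).filter (fun i => pyCell board i baseY ≠ 0))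
  else if direction = "left" ∨ direction = "right" then
    selectNear direction baseY
      ((PySem.List.pyRange 0 (n : Int) 1).filter (fun j => pyCell board baseX j ≠ 0))
  else none

-- ===== PRECONDITION & SPEC =====
-- Pre_ restricts to the function's natural domain: when the direction is one of the four moves,
-- the base cell must lie on the board and no row may be shorter than the board height (A indexes
-- columns up to len(board)); outside it A may raise IndexError or index via Python's negative
-- wraparound, and B may raise where A's early return skipped the bad access.
def Pre_getNear (direction : String) (baseX : Int) (baseY : Int) (board : List (List Int)) : Prop :=
  (direction = "up" ∨ direction = "down" ∨ direction = "left" ∨ direction = "right") →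
    (0 ≤ baseX ∧ baseX + 1 ≤ (board.length : Int) ∧ 0 ≤ baseY ∧ baseY + 1 ≤ (board.length : Int) ∧
     ∀ row ∈ board, board.length ≤ row.length)
instance (direction : String) (baseX : Int) (baseY : Int) (board : List (List Int)) : Decidable (Pre_getNear direction baseX baseY board) := by unfold Pre_getNear; infer_instance

def pvWitness_getNear : String × Int × Int × List (List Int) := ("up", 0, 0, [[0, 2], [4, 0]])

def Spec_getNear (direction : String) (baseX : Int) (baseY : Int) (board : List (List Int)) (out : Option Int) : Prop := out = getNear_alt direction baseX baseY board
instance (direction : String) (baseX : Int) (baseY : Int) (board : List (List Int)) (out : Option Int) : Decidable (Spec_getNear direction baseX baseY board out) := by unfold Spec_getNear; infer_instance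

-- ===== CLAIM (what is proved, stated in full; the proofs are below) =====
def Claim_equal_getNear : Prop := ∀ (direction : String) (baseX : Int) (baseY : Int) (board : List (List Int)), Dom_getNear direction baseX baseY board → Pre_getNear direction baseX baseY board → Spec_getNear direction baseX baseY board (getNear direction baseX baseY board)

-- ===== LEMMAS AND PROOFS =====

-- A's scan with a never-matching skip is first-match search
lemma scanA_no_skip (f : Int → Int) (s : Int) (l : List Int) (h : ∀ c ∈ l, c ≠ s) :
    scanA f s l = l.find? (fun c => f c ≠ 0) := by
  induction l with
  | nil => rfl
  | cons c rest ih =>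
    have hc : ¬ c = s := h c (by simp)
    by_cases hf : f c ≠ 0
    · simp [scanA, List.find?, hc, hf]
    · simp only [scanA, if_neg hc, if_neg hf, List.find?]
      simp only [ne_eq, not_not] at hf
      simp [hf, ih (fun x hx => h x (by simp [hx]))]

lemma head?_filter {α : Type} (p : α → Bool) (l : List α) :
    (l.filter p).head? = l.find? p := by
  induction l with
  | nil => rfl
  | cons a t ih =>
    by_cases h : p a <;> simp [List.filter, List.find?, h, ih]

lemma foldl_min_of_le (x : Int) (t : List Int) (h : ∀ y ∈ t, x ≤ y) :
    t.foldl min x = x := by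
  induction t generalizing x with
  | nil => rfl
  | cons y t' ih =>
    have : min x y = x := min_eq_left (h y (by simp))
    simp only [List.foldl, this]
    exact ih x (fun z hz => h z (by simp [hz]))

-- first extremum of a strictly ascending list: min is the head, max is the last element
lemma min?_of_sorted (l : List Int) (h : l.Pairwise (· < ·)) :
    (if l = [] then none else PySem.List.min? l (fun x => x)) = l.head? := by
  cases l with
  | nil => rfl
  | cons x t =>
    have hx : ∀ y ∈ t, x ≤ y := fun y hy => le_of_lt ((List.pairwise_cons.mp h).1 y hy)
    simp [PySem.List.min?_id_cons, foldl_min_of_le x t hx]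

lemma max?_of_sorted (l : List Int) (h : l.Pairwise (· < ·)) :
    (if l = [] then none else PySem.List.max? l (fun x => x)) = l.getLast? := by
  induction l with
  | nil => rfl
  | cons x t ih =>
    cases t with
    | nil => simp [PySem.List.max?_id_cons]
    | cons y t' =>
      have hxy : x < y := (List.pairwise_cons.mp h).1 y (by simp)
      have ht : (y :: t').Pairwise (· < ·) := (List.pairwise_cons.mp h).2
      have h1 : (x :: y :: t').getLast? = (y :: t').getLast? := by
        simp [List.getLast?]
      rw [h1, ← ih ht]
      simp [PySem.List.max?_id_cons, max_eq_right (le_of_lt hxy)]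

-- splitting the full-range filter at the base ('up'/'left' side)
lemma filter_range_above (f : Int → Int) (n base : Int) (h0 : 0 ≤ base) (h1 : base < n) :
    ((PySem.List.pyRange 0 n 1).filter (fun i => f i ≠ 0)).filter (fun k => base < k)
      = (PySem.List.pyRange (base + 1) n 1).filter (fun i => f i ≠ 0) := by
  rw [List.filter_filter,
      PySem.List.pyRange_one_append 0 (base + 1) n (by omega) (by omega),
      List.filter_append]
  have e1 : (PySem.List.pyRange 0 (base + 1) 1).filter
      (fun a => decide (base < a) && decide (f a ≠ 0)) = [] := by
    rw [List.filter_eq_nil_iff]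
    intro a ha
    have := (PySem.List.mem_pyRange_one.mp ha)
    simp [show ¬ base < a by omega]
  have e2 : (PySem.List.pyRange (base + 1) n 1).filter
      (fun a => decide (base < a) && decide (f a ≠ 0))
      = (PySem.List.pyRange (base + 1) n 1).filter (fun i => f i ≠ 0) := by
    apply List.filter_congr
    intro a ha
    have := (PySem.List.mem_pyRange_one.mp ha)
    simp [show base < a by omega]
  rw [e1, e2, List.nil_append]

-- splitting the full-range filter at the base ('down'/'right' side)
lemma filter_range_below (f : Int → Int) (n base : Int) (h0 : 0 ≤ base) (h1 : base < n) :
    ((PySem.List.pyRange 0 n 1).filter (fun i => f i ≠ 0)).filter (fun k => k < base)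
      = (PySem.List.pyRange 0 base 1).filter (fun i => f i ≠ 0) := by
  rw [List.filter_filter,
      PySem.List.pyRange_one_append 0 base n (by omega) (by omega),
      List.filter_append]
  have e1 : (PySem.List.pyRange 0 base 1).filter
      (fun a => decide (a < base) && decide (f a ≠ 0))
      = (PySem.List.pyRange 0 base 1).filter (fun i => f i ≠ 0) := by
    apply List.filter_congr
    intro a ha
    have := (PySem.List.mem_pyRange_one.mp ha)
    simp [show a < base by omega]
  have e2 : (PySem.List.pyRange base n 1).filter
      (fun a => decide (a < base) && decide (f a ≠ 0)) = [] := by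
    rw [List.filter_eq_nil_iff]
    intro a ha
    have := (PySem.List.mem_pyRange_one.mp ha)
    simp [show ¬ a < base by omega]
  rw [e1, e2, List.append_nil]

-- ascending case: A's outward scan from base equals B's min-over-hits-above-base
lemma asc_case (f : Int → Int) (n base : Int) (h0 : 0 ≤ base) (h1 : base < n) :
    scanA f base (PySem.List.pyRange base n 1)
      = (let after := ((PySem.List.pyRange 0 n 1).filter (fun i => f i ≠ 0)).filter
          (fun k => base < k)
         if after = [] then none else PySem.List.min? after (fun x => x)) := by
  have hpair : (((PySem.List.pyRange 0 n 1).filter (fun i => f i ≠ 0)).filter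
      (fun k => base < k)).Pairwise (· < ·) :=
    ((PySem.List.pairwise_lt_pyRange_one 0 n).filter _).filter _
  rw [min?_of_sorted _ hpair, filter_range_above f n base h0 h1, head?_filter,
      PySem.List.pyRange_one_cons h1]
  rw [show scanA f base (base :: PySem.List.pyRange (base + 1) n 1)
        = scanA f base (PySem.List.pyRange (base + 1) n 1) by simp [scanA]]
  apply scanA_no_skip
  intro c hc
  have := PySem.List.mem_pyRange_one.mp hc
  omega

-- descending case: A's downward scan from base equals B's max-over-hits-below-base
lemma desc_case (f : Int → Int) (n base : Int) (h0 : 0 ≤ base) (h1 : base < n) :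
    scanA f base (PySem.List.pyRange base (-1) (-1))
      = (let before := ((PySem.List.pyRange 0 n 1).filter (fun i => f i ≠ 0)).filter
          (fun k => k < base)
         if before = [] then none else PySem.List.max? before (fun x => x)) := by
  have hpair : (((PySem.List.pyRange 0 n 1).filter (fun i => f i ≠ 0)).filter
      (fun k => k < base)).Pairwise (· < ·) :=
    ((PySem.List.pairwise_lt_pyRange_one 0 n).filter _).filter _
  rw [max?_of_sorted _ hpair, filter_range_below f n base h0 h1,
      PySem.List.pyRange_neg_one_cons (by omega : (-1 : Int) < base)]
  rw [show scanA f base (base :: PySem.List.pyRange (base - 1) (-1) (-1))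
        = scanA f base (PySem.List.pyRange (base - 1) (-1) (-1)) by simp [scanA]]
  rw [scanA_no_skip f base _ (by
    intro c hc
    have := PySem.List.mem_pyRange_neg_one.mp hc
    omega)]
  rw [show (base - 1 : Int) = (-1) + 1 + (base - 1 + 1) - 1 by ring]
  rw [show PySem.List.pyRange ((-1) + 1 + (base - 1 + 1) - 1) (-1) (-1)
        = (PySem.List.pyRange 0 base 1).reverse by
      rw [PySem.List.pyRange_neg_one_eq_reverse]; norm_num]
  rw [← head?_filter, List.filter_reverse, List.head?_reverse]

-- ===== VERDICT (by name: the statement is the Claim_ definition above) =====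
theorem getNear_spec : Claim_equal_getNear := by
  intro direction baseX baseY board _hDom hPre
  unfold Spec_getNear
  by_cases hu : direction = "up"
  · obtain ⟨hx0, hx1, hy0, hy1, _⟩ := hPre (Or.inl hu)
    subst hu
    simpa [getNear, getNear_alt, selectNear] using
      asc_case (fun i => pyCell board i baseY) (board.length : Int) baseX hx0 (by omega)
  · by_cases hd : direction = "down"
    · obtain ⟨hx0, hx1, hy0, hy1, _⟩ := hPre (Or.inr (Or.inl hd))
      subst hd
      simpa [getNear, getNear_alt, selectNear] using
        desc_case (fun i => pyCell board i baseY) (board.length : Int) baseX hx0 (by omega)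
    · by_cases hl : direction = "left"
      · obtain ⟨hx0, hx1, hy0, hy1, _⟩ := hPre (Or.inr (Or.inr (Or.inl hl)))
        subst hl
        simpa [getNear, getNear_alt, selectNear] using
          asc_case (fun j => pyCell board baseX j) (board.length : Int) baseY hy0 (by omega)
      · by_cases hr : direction = "right"
        · obtain ⟨hx0, hx1, hy0, hy1, _⟩ := hPre (Or.inr (Or.inr (Or.inr hr)))
          subst hr
          simpa [getNear, getNear_alt, selectNear] using
            desc_case (fun j => pyCell board baseX j) (board.length : Int) baseY hy0 (by omega)
        · simp [getNear, getNear_alt, hu, hd, hl, hr]
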